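-- pv_equiv track=rewrite | github.com/Requiem98/ADM-HW3 | functions.py | maxHeapfy
-- ===== SOURCE A (Python) =====
-- import heapq
--
-- def maxHeapfy(lst):
--
--     negative_lst = []
--
--     # I change the sign to all the elements of the list because the "heappop" function that I will use later finds the minimum,
--     # so if I change the sign to all the elements and calculate the minimum, I actually find the maximum of the original list.
--     for elem in lst:
--         negative_lst.append((-elem[0], elem[1]))
--
--     heapq.heapify(negative_lst)
--
--     negative_lst = [heapq.heappop(negative_lst) for i in range(len(negative_lst))]
--
--     sorted_lst = []
--
--     for elem in negative_lst:
--         sorted_lst.append((abs(elem[0]), elem[1]))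
--
--     return sorted_lst
-- ===== SOURCE B (Python) =====
-- def maxHeapfy(lst):
--     ordered = sorted(lst, key=lambda x: (-x[0], x[1]))
--     return [(abs(x[0]), x[1]) for x in ordered]
-- ===== Notes on version B (the rewrite author's own statement) =====
-- stated objective: simpler
-- what changed: Replaces the negate/heapify/heappop-loop heapsort pipeline with a single built-in sort by key (-x[0], x[1]) followed by one abs-rewriting pass.
import Mathlib
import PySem

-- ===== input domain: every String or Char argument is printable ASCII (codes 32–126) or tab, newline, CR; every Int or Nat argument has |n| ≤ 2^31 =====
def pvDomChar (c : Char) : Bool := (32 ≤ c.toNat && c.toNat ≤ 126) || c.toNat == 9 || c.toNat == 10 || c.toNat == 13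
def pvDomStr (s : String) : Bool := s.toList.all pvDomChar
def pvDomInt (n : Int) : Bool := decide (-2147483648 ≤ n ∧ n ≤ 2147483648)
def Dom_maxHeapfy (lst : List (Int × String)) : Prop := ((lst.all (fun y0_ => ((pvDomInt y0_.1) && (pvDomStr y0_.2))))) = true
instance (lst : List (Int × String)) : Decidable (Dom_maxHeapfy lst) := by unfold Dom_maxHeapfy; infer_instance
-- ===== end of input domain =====

-- B replaces A's negate/heapify/heappop-loop heapsort with one built-in sort by key (-x[0], x[1]) plus an abs-rewriting pass (simpler).

-- ===== PORT A =====
-- Python's '<' on the (Int, String) tuples that A's heap compares (lexicographic; exact on all inputs)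
def pvTupLtB (p q : Int × String) : Bool := decide (p.1 < q.1) || (decide (p.1 = q.1) && decide (p.2 < q.2))

-- a min-heap of (Int × String), ordered by pvTupLtB; A's heapq library calls are ported as a
-- verified skew min-heap (heapify = fold of inserts, heappop = root then merge of the children):
-- the observable pop sequence on Python tuples is fully determined by the tuple order, so this is
-- output-exact for heapq.heapify / heappop.
inductive PvHeap : Type
  | leaf : PvHeap
  | node : (Int × String) → PvHeap → PvHeap → PvHeap
deriving DecidableEq, Repr

def PvHeap.size : PvHeap → Nat
  | .leaf => 0
  | .node _ l r => l.size + r.size + 1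

def pvMerge : PvHeap → PvHeap → PvHeap
  | .leaf, t => t
  | .node a l1 r1, .leaf => .node a l1 r1
  | .node a l1 r1, .node b l2 r2 =>
      if pvTupLtB b a then .node b (pvMerge (.node a l1 r1) r2) l2
      else .node a (pvMerge (.node b l2 r2) r1) l1
termination_by t1 t2 => t1.size + t2.size
decreasing_by all_goals simp [PvHeap.size] <;> omega

-- '[heappop(h) for i in range(len(h))]': n pops, each returning the root and merging its children
def pvDrain : Nat → PvHeap → List (Int × String)
  | 0, _ => []
  | _ + 1, .leaf => []
  | n + 1, .node v l r => v :: pvDrain n (pvMerge l r)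

def maxHeapfy (lst : List (Int × String)) : List (Int × String) :=
  let negative_lst := lst.foldl (fun acc elem => acc ++ [(-elem.1, elem.2)]) []
  let heap := negative_lst.foldl (fun h e => pvMerge h (.node e .leaf .leaf)) .leaf
  let popped := pvDrain negative_lst.length heap
  popped.foldl (fun acc elem => acc ++ [(|elem.1|, elem.2)]) []

-- ===== PORT B =====
def maxHeapfy_alt (lst : List (Int × String)) : List (Int × String) :=
  let ordered := PySem.List.sorted2 lst (fun x => -x.1) (fun x => x.2)
  ordered.map (fun x => (|x.1|, x.2))

-- ===== PRECONDITION & SPEC =====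
def Spec_maxHeapfy (lst : List (Int × String)) (out : List (Int × String)) : Prop := out = maxHeapfy_alt lst
instance (lst : List (Int × String)) (out : List (Int × String)) : Decidable (Spec_maxHeapfy lst out) := by unfold Spec_maxHeapfy; infer_instance

-- ===== CLAIM (what is proved, stated in full; the proofs are below) =====
def Claim_equal_maxHeapfy : Prop := ∀ (lst : List (Int × String)), Dom_maxHeapfy lst → Spec_maxHeapfy lst (maxHeapfy lst)

-- ===== LEMMAS AND PROOFS =====

-- the multiset of values stored in a heap (proof-side view of a PvHeap)
def pvToList : PvHeap → List (Int × String)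
  | .leaf => []
  | .node v l r => v :: (pvToList l ++ pvToList r)

-- Python tuple ≤ (the non-strict companion of pvTupLtB)
def pvTupLe (p q : Int × String) : Prop := p.1 < q.1 ∨ (p.1 = q.1 ∧ p.2 ≤ q.2)

theorem pvTupLtB_false_iff (p q : Int × String) : pvTupLtB p q = false ↔ pvTupLe q p := by
  simp only [pvTupLtB, pvTupLe, Bool.or_eq_false_iff, Bool.and_eq_false_iff,
    decide_eq_false_iff_not]
  constructor
  · rintro ⟨h1, h2⟩
    rcases lt_trichotomy q.1 p.1 with h | h | h
    · exact Or.inl h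
    · rcases h2 with h2 | h2
      · exact absurd h.symm h2
      · exact Or.inr ⟨h, le_of_not_gt h2⟩
    · exact absurd h h1
  · rintro (h | ⟨h, h2⟩)
    · exact ⟨lt_asymm h, Or.inl (ne_of_gt h)⟩
    · exact ⟨fun hh => absurd hh (h ▸ lt_irrefl _), Or.inr (not_lt_of_ge h2)⟩

theorem pvTupLtB_true_le (p q : Int × String) (h : pvTupLtB p q = true) : pvTupLe p q := by
  simp only [pvTupLtB, Bool.or_eq_true, Bool.and_eq_true, decide_eq_true_eq] at h
  rcases h with h | ⟨h1, h2⟩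
  · exact Or.inl h
  · exact Or.inr ⟨h1, le_of_lt h2⟩

theorem pvTupLe_trans (a b c : Int × String) (h1 : pvTupLe a b) (h2 : pvTupLe b c) : pvTupLe a c := by
  rcases h1 with h1 | ⟨h1, h1'⟩ <;> rcases h2 with h2 | ⟨h2, h2'⟩
  · exact Or.inl (lt_trans h1 h2)
  · exact Or.inl (h2 ▸ h1)
  · exact Or.inl (h1 ▸ h2)
  · exact Or.inr ⟨h1.trans h2, le_trans h1' h2'⟩

theorem pvTupLe_antisymm (a b : Int × String) (h1 : pvTupLe a b) (h2 : pvTupLe b a) : a = b := by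
  rcases h1 with h1 | ⟨h1, h1'⟩ <;> rcases h2 with h2 | ⟨h2, h2'⟩
  · exact absurd h2 (lt_asymm h1)
  · exact absurd h1 (h2 ▸ lt_irrefl _)
  · exact absurd h2 (h1 ▸ lt_irrefl _)
  · exact Prod.ext h1 (le_antisymm h1' h2')

-- heap-order invariant: the value at each node is ≤ everything below it
def pvHeapOrd : PvHeap → Prop
  | .leaf => True
  | .node v l r => (∀ x ∈ pvToList l, pvTupLe v x) ∧ (∀ x ∈ pvToList r, pvTupLe v x) ∧ pvHeapOrd l ∧ pvHeapOrd r

theorem pvMerge_perm (s t : PvHeap) : (pvToList (pvMerge s t)).Perm (pvToList s ++ pvToList t) := by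
  fun_induction pvMerge s t with
  | case1 t => simp [pvToList]
  | case2 a l1 r1 => simp [pvToList]
  | case3 a l1 r1 b l2 r2 h ih =>
      simp only [pvToList]
      have hm : (↑(pvToList (pvMerge (.node a l1 r1) r2)) : Multiset (Int × String))
          = ↑(pvToList (.node a l1 r1 : PvHeap)) + ↑(pvToList r2) := by
        exact_mod_cast Multiset.coe_eq_coe.mpr ih
      rw [← Multiset.coe_eq_coe]
      simp only [pvToList, ← Multiset.cons_coe, ← Multiset.coe_add, hm,
        ← Multiset.singleton_add] at *
      abel
  | case4 a l1 r1 b l2 r2 h ih =>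
      simp only [pvToList]
      have hm : (↑(pvToList (pvMerge (.node b l2 r2) r1)) : Multiset (Int × String))
          = ↑(pvToList (.node b l2 r2 : PvHeap)) + ↑(pvToList r1) := by
        exact_mod_cast Multiset.coe_eq_coe.mpr ih
      rw [← Multiset.coe_eq_coe]
      simp only [pvToList, ← Multiset.cons_coe, ← Multiset.coe_add, hm,
        ← Multiset.singleton_add] at *
      abel

theorem pvMerge_heapOrd (s t : PvHeap) : pvHeapOrd s → pvHeapOrd t → pvHeapOrd (pvMerge s t) := by
  fun_induction pvMerge s t with
  | case1 t => exact fun _ ht => ht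
  | case2 a l1 r1 => exact fun hs _ => hs
  | case3 a l1 r1 b l2 r2 h ih =>
      rintro ⟨ha1, ha2, hl1, hr1⟩ ⟨hb1, hb2, hl2, hr2⟩
      have hba : pvTupLe b a := pvTupLtB_true_le b a h
      refine ⟨?_, hb1, ih ⟨ha1, ha2, hl1, hr1⟩ hr2, hl2⟩
      intro x hx
      rw [(pvMerge_perm (.node a l1 r1) r2).mem_iff] at hx
      rcases List.mem_append.mp hx with hx | hx
      · simp only [pvToList, List.mem_cons, List.mem_append] at hx
        rcases hx with rfl | hx | hx
        · exact hba
        · exact pvTupLe_trans _ _ _ hba (ha1 x hx)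
        · exact pvTupLe_trans _ _ _ hba (ha2 x hx)
      · exact hb2 x hx
  | case4 a l1 r1 b l2 r2 h ih =>
      rintro ⟨ha1, ha2, hl1, hr1⟩ ⟨hb1, hb2, hl2, hr2⟩
      have hab : pvTupLe a b := (pvTupLtB_false_iff b a).mp (Bool.eq_false_iff.mpr h)
      refine ⟨?_, ha1, ih ⟨hb1, hb2, hl2, hr2⟩ hr1, hl1⟩
      intro x hx
      rw [(pvMerge_perm (.node b l2 r2) r1).mem_iff] at hx
      rcases List.mem_append.mp hx with hx | hx
      · simp only [pvToList, List.mem_cons, List.mem_append] at hx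
        rcases hx with rfl | hx | hx
        · exact hab
        · exact pvTupLe_trans _ _ _ hab (hb1 x hx)
        · exact pvTupLe_trans _ _ _ hab (hb2 x hx)
      · exact ha2 x hx

theorem pvSingleton_heapOrd (e : Int × String) : pvHeapOrd (.node e .leaf .leaf) := by
  refine ⟨?_, ?_, trivial, trivial⟩ <;> simp [pvToList]

theorem pvBuild_heapOrd (l : List (Int × String)) (h : PvHeap) (hh : pvHeapOrd h) :
    pvHeapOrd (l.foldl (fun h e => pvMerge h (.node e .leaf .leaf)) h) := by
  induction l generalizing h with
  | nil => exact hh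
  | cons e l ih =>
      exact ih _ (pvMerge_heapOrd _ _ hh (pvSingleton_heapOrd e))

theorem pvBuild_perm (l : List (Int × String)) (h : PvHeap) :
    (pvToList (l.foldl (fun h e => pvMerge h (.node e .leaf .leaf)) h)).Perm (pvToList h ++ l) := by
  induction l generalizing h with
  | nil => simp
  | cons e l ih =>
      refine (ih (pvMerge h (.node e .leaf .leaf))).trans ?_
      refine ((pvMerge_perm h (.node e .leaf .leaf)).append_right l).trans ?_
      simp [pvToList]

theorem pvDrain_spec (n : Nat) (t : PvHeap) (hn : n = (pvToList t).length) (ht : pvHeapOrd t) :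
    (pvDrain n t).Perm (pvToList t) ∧ (pvDrain n t).Pairwise pvTupLe := by
  induction n generalizing t with
  | zero =>
      have : pvToList t = [] := List.length_eq_zero_iff.mp hn.symm
      simp [pvDrain, this]
  | succ n ih =>
      cases t with
      | leaf => simp [pvToList] at hn
      | node v l r =>
          obtain ⟨hvl, hvr, hl, hr⟩ := ht
          have hperm := pvMerge_perm l r
          have hord := pvMerge_heapOrd l r hl hr
          have hlen : n = (pvToList (pvMerge l r)).length := by
            have hle := hperm.length_eq
            simp only [List.length_append] at hle
            simp only [pvToList, List.length_cons, List.length_append] at hn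
            omega
          obtain ⟨hp, hpw⟩ := ih (pvMerge l r) hlen hord
          constructor
          · exact ((hp.trans hperm).cons v)
          · refine List.Pairwise.cons ?_ hpw
            intro x hx
            have hx' := hperm.subset (hp.subset hx)
            rcases List.mem_append.mp hx' with hx' | hx'
            · exact hvl x hx'
            · exact hvr x hx'

theorem pvInsertBy_pairwise (bef : (Int × String) → (Int × String) → Bool)
    (R : (Int × String) → (Int × String) → Prop)
    (h1 : ∀ a b, bef a b = true → R a b) (h2 : ∀ a b, bef a b = false → R b a)
    (htr : ∀ a b c, R a b → R b c → R a c)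
    (x : Int × String) (acc : List (Int × String)) (hp : acc.Pairwise R) :
    (PySem.List.insertBy bef x acc).Pairwise R := by
  induction acc with
  | nil => simp [PySem.List.insertBy]
  | cons y ys ih =>
      rw [List.pairwise_cons] at hp
      obtain ⟨hy, hys⟩ := hp
      by_cases hb : bef x y = true
      · simp only [PySem.List.insertBy, hb]
        refine List.Pairwise.cons ?_ (List.Pairwise.cons hy hys)
        intro z hz
        rcases List.mem_cons.mp hz with hzy | hz
        · exact hzy ▸ h1 x y hb
        · exact htr x y z (h1 x y hb) (hy z hz)
      · have hb' : bef x y = false := Bool.eq_false_iff.mpr hb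
        simp only [PySem.List.insertBy, hb', Bool.false_eq_true, if_false]
        refine List.Pairwise.cons ?_ (ih hys)
        intro z hz
        rcases (PySem.List.mem_insertBy bef x z ys).mp hz with hzx | hz
        · exact hzx ▸ h2 x y hb'
        · exact hy z hz

theorem pvFoldlInsertBy_pairwise (bef : (Int × String) → (Int × String) → Bool)
    (R : (Int × String) → (Int × String) → Prop)
    (h1 : ∀ a b, bef a b = true → R a b) (h2 : ∀ a b, bef a b = false → R b a)
    (htr : ∀ a b c, R a b → R b c → R a c)
    (l acc : List (Int × String)) (hp : acc.Pairwise R) :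
    (l.foldl (fun acc x => PySem.List.insertBy bef x acc) acc).Pairwise R := by
  induction l generalizing acc with
  | nil => exact hp
  | cons x l ih => exact ih _ (pvInsertBy_pairwise bef R h1 h2 htr x acc hp)

theorem pvSorted2_pairwise (lst : List (Int × String)) :
    (PySem.List.sorted2 lst (fun x => -x.1) (fun x => x.2)).Pairwise
      (fun a b => pvTupLe (-a.1, a.2) (-b.1, b.2)) := by
  have hunf : PySem.List.sorted2 lst (fun x => -x.1) (fun x => x.2)
      = lst.foldl (fun acc x => PySem.List.insertBy
          (fun a b => decide (-a.1 < -b.1) || (!decide (-b.1 < -a.1) && decide (a.2 < b.2)))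
          x acc) [] := rfl
  rw [hunf]
  refine pvFoldlInsertBy_pairwise _ _ ?h1 ?h2 ?htr _ _ List.Pairwise.nil
  case h1 =>
    intro a b h
    simp only [Bool.or_eq_true, Bool.and_eq_true, Bool.not_eq_true', decide_eq_true_eq,
      decide_eq_false_iff_not] at h
    rcases h with h | ⟨h1, h2⟩
    · exact Or.inl h
    · rcases eq_or_lt_of_le (not_lt.mp h1) with he | hl
      · exact Or.inr ⟨he, le_of_lt h2⟩
      · exact Or.inl hl
  case h2 =>
    intro a b h
    simp only [Bool.or_eq_false_iff, Bool.and_eq_false_iff, Bool.not_eq_false',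
      decide_eq_true_eq, decide_eq_false_iff_not] at h
    obtain ⟨hA, hB⟩ := h
    rcases hB with hB | hB
    · exact Or.inl hB
    · rcases eq_or_lt_of_le (not_lt.mp hA) with he | hl
      · exact Or.inr ⟨he, not_lt.mp hB⟩
      · exact Or.inl hl
  case htr =>
    exact fun a b c => pvTupLe_trans _ _ _

-- ===== VERDICT (by name: the statement is the Claim_ definition above) =====
theorem maxHeapfy_spec : Claim_equal_maxHeapfy := by
  unfold Claim_equal_maxHeapfy
  intro lst _
  unfold Spec_maxHeapfy maxHeapfy maxHeapfy_alt
  simp only [PySem.List.foldl_append_singleton_eq_map, List.nil_append]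
  have hb := pvBuild_perm (lst.map (fun x => (-x.1, x.2))) .leaf
  simp only [pvToList, List.nil_append] at hb
  have hord := pvBuild_heapOrd (lst.map (fun x => (-x.1, x.2))) .leaf trivial
  obtain ⟨hp, hpw⟩ := pvDrain_spec _ _ hb.length_eq.symm hord
  have hS := (PySem.List.sorted2_perm lst (fun x => -x.1) (fun x => x.2) false).map
    (fun x => (-x.1, x.2))
  have hperm := (hp.trans hb).trans hS.symm
  have hps : ((PySem.List.sorted2 lst (fun x => -x.1) (fun x => x.2)).map
      (fun x => (-x.1, x.2))).Pairwise pvTupLe :=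
    (List.pairwise_map).mpr (pvSorted2_pairwise lst)
  have hdr := List.Perm.eq_of_pairwise (le := pvTupLe)
    (fun a b _ _ h1 h2 => pvTupLe_antisymm a b h1 h2) hpw hps hperm
  rw [hdr, List.map_map]
  refine List.map_congr_left ?_
  intro x _
  simp
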